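-- pv_equiv track=rewrite | github.com/RideMatch1/qubic-church | apps/web/scripts/anna_binary_message_decoder_v2.py | block_xor
-- ===== SOURCE A (Python) =====
-- from typing import List, Dict, Any, Tuple
--
-- def block_xor(matrix: List[List[int]], block_size: int = 8) -> List[List[int]]:
--     """XOR blocks of values together."""
--     result = []
--     for row in matrix:
--         new_row = []
--         for i in range(0, len(row), block_size):
--             block = row[i:i+block_size]
--             xor_val = 0
--             for v in block:
--                 xor_val ^= abs(v)
--             new_row.append(xor_val)
--         result.append(new_row)
--     return result
-- ===== SOURCE B (Python) =====
-- def block_xor(matrix, block_size=8):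
--     """XOR blocks of values together: one flat scatter pass per row."""
--     result = []
--     for row in matrix:
--         new_row = [0] * ((len(row) + block_size - 1) // block_size)
--         for i, v in enumerate(row):
--             new_row[i // block_size] ^= abs(v)
--         result.append(new_row)
--     return result
-- ===== Notes on version B (the rewrite author's own statement) =====
-- stated objective: alternative
-- what changed: Replaced the nested slice-a-block-then-reduce loops with a preallocated output row and a single flat enumerate pass that scatters each abs(value) into its block slot by index division.
-- outside the precondition, e.g. on block_xor([[1, 2]], -1): A returns [[]], B raises IndexError; on block_xor([[1]], 0): A raises ValueError, B raises ZeroDivisionError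
import Mathlib
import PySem

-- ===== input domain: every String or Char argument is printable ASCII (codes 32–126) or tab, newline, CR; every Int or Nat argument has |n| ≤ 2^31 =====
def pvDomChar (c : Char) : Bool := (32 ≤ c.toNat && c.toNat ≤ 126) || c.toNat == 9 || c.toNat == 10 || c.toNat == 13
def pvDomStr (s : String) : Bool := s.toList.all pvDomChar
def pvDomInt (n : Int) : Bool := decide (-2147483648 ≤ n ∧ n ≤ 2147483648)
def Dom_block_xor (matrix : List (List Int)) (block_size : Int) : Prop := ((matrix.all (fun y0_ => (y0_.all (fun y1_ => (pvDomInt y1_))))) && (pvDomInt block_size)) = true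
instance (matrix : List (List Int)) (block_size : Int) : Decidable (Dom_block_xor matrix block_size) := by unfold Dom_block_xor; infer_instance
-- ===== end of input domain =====

-- B replaces A's nested slice-then-reduce loops by one flat scatter pass per row: an alternative decomposition, same cost.


-- ===== PORT A =====
def block_xor (matrix : List (List Int)) (block_size : Int) : List (List Int) :=
  matrix.foldl (fun result row =>
    result ++ [(PySem.List.pyRange 0 (row.length : Int) block_size).foldl
      (fun new_row i =>
        new_row ++ [(PySem.List.slice row (some i) (some (i + block_size))).foldl
          (fun xor_val v => PySem.Int.bxor xor_val |v|) 0]) []]) []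

-- ===== PORT B =====
def block_xor_alt (matrix : List (List Int)) (block_size : Int) : List (List Int) :=
  matrix.foldl (fun result row =>
    result ++ [(PySem.List.enumerate row 0).foldl
      (fun new_row iv =>
        PySem.List.pySetD new_row (PySem.Int.floordiv iv.1 block_size)
          (PySem.Int.bxor (PySem.List.pyGetD new_row (PySem.Int.floordiv iv.1 block_size) 0) |iv.2|))
      (List.replicate (PySem.Int.floordiv ((row.length : Int) + block_size - 1) block_size).toNat 0)]) []

-- ===== PRECONDITION & SPEC =====
-- Pre_ restricts to the natural domain block_size ≥ 1: A raises ValueError (range step 0) on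
-- block_size = 0, and a nonpositive block size is outside the function's natural domain (A's
-- empty rows for negative block_size are an artefact of range(); B raises IndexError there).
def Pre_block_xor (matrix : List (List Int)) (block_size : Int) : Prop := 1 ≤ block_size
instance (matrix : List (List Int)) (block_size : Int) : Decidable (Pre_block_xor matrix block_size) := by unfold Pre_block_xor; infer_instance

def pvWitness_block_xor : List (List Int) × Int := ([[1, -2, 3], [4, 5]], 2)

def Spec_block_xor (matrix : List (List Int)) (block_size : Int) (out : List (List Int)) : Prop := out = block_xor_alt matrix block_size
instance (matrix : List (List Int)) (block_size : Int) (out : List (List Int)) : Decidable (Spec_block_xor matrix block_size out) := by unfold Spec_block_xor; infer_instance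

-- ===== CLAIM (what is proved, stated in full; the proofs are below) =====
def Claim_equal_block_xor : Prop := ∀ (matrix : List (List Int)) (block_size : Int), Dom_block_xor matrix block_size → Pre_block_xor matrix block_size → Spec_block_xor matrix block_size (block_xor matrix block_size)

-- ===== LEMMAS AND PROOFS =====

-- enumerate splits over append
lemma pv_enumerate_append (xs ys : List Int) (s : Int) :
    PySem.List.enumerate (xs ++ ys) s
      = PySem.List.enumerate xs s ++ PySem.List.enumerate ys (s + xs.length) := by
  induction xs generalizing s with
  | nil => simp [PySem.List.enumerate_nil]
  | cons x xs ih =>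
      simp [PySem.List.enumerate_cons, ih, add_assoc]
      ring_nf

-- the scatter step of B, abbreviated for the lemmas (unfolded to the port's lambda in the final proof)
def pvStep (b : Int) (nr : List Int) (iv : Int × Int) : List Int :=
  PySem.List.pySetD nr (PySem.Int.floordiv iv.1 b)
    (PySem.Int.bxor (PySem.List.pyGetD nr (PySem.Int.floordiv iv.1 b) 0) |iv.2|)

-- scattering one chunk (all indices in [s, b)) folds its xor into the head slot
lemma pv_chunk0 (b : Int) (hb : 0 < b) (c : List Int) :
    ∀ (s acc : Int) (rest : List Int), 0 ≤ s → s + (c.length : Int) ≤ b →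
    (PySem.List.enumerate c s).foldl (pvStep b) (acc :: rest)
      = (c.foldl (fun a v => PySem.Int.bxor a |v|) acc) :: rest := by
  induction c with
  | nil => intro s acc rest _ _; simp [PySem.List.enumerate_nil]
  | cons x xs ih =>
      intro s acc rest hs hle
      simp only [List.length_cons, Nat.cast_add, Nat.cast_one] at hle
      have hfd : PySem.Int.floordiv s b = 0 := by
        rw [PySem.Int.floordiv_eq_iff_of_pos hb]
        simp only [zero_mul, zero_add, one_mul]
        omega
      rw [PySem.List.enumerate_cons]
      simp only [List.foldl_cons, pvStep, hfd]
      rw [PySem.List.pyGetD_zero_cons, PySem.List.pySetD_of_nonneg _ _ le_rfl]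
      simp only [Int.toNat_zero, List.set_cons_zero]
      rw [ih (s + 1) _ rest (by omega) (by omega)]

-- indices shifted by b leave the head slot untouched and scatter into the tail
lemma pv_shift (b : Int) (hb : 0 < b) (xs : List Int) :
    ∀ (s x : Int) (arr : List Int), 0 ≤ s →
    (PySem.List.enumerate xs (b + s)).foldl (pvStep b) (x :: arr)
      = x :: (PySem.List.enumerate xs s).foldl (pvStep b) arr := by
  induction xs with
  | nil => intro s x arr _; simp [PySem.List.enumerate_nil]
  | cons y ys ih =>
      intro s x arr hs
      have hq0 : 0 ≤ PySem.Int.floordiv s b := by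
        rw [PySem.Int.floordiv_eq_ediv_of_pos hb]; exact Int.ediv_nonneg hs (le_of_lt hb)
      have hfd : PySem.Int.floordiv (b + s) b = 1 + PySem.Int.floordiv s b := by
        rw [PySem.Int.floordiv_eq_ediv_of_pos hb, PySem.Int.floordiv_eq_ediv_of_pos hb,
            show b + s = s + 1 * b by ring, Int.add_mul_ediv_right s 1 (by omega : b ≠ 0)]
        ring
      rw [PySem.List.enumerate_cons, PySem.List.enumerate_cons]
      simp only [List.foldl_cons, pvStep, hfd]
      have htn : (1 + PySem.Int.floordiv s b).toNat = (PySem.Int.floordiv s b).toNat + 1 := by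
        omega
      have hget : PySem.List.pyGetD (x :: arr) (1 + PySem.Int.floordiv s b) 0
          = PySem.List.pyGetD arr (PySem.Int.floordiv s b) 0 := by
        rw [PySem.List.pyGetD_of_nonneg _ _ (by omega), PySem.List.pyGetD_of_nonneg _ _ hq0,
            htn, List.getD_cons_succ]
      have hset : ∀ v, PySem.List.pySetD (x :: arr) (1 + PySem.Int.floordiv s b) v
          = x :: PySem.List.pySetD arr (PySem.Int.floordiv s b) v := by
        intro v
        rw [PySem.List.pySetD_of_nonneg _ _ (by omega), PySem.List.pySetD_of_nonneg _ _ hq0,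
            htn, List.set_cons_succ]
      rw [hget, hset, show b + s + 1 = b + (s + 1) by ring, ih (s + 1) x _ (by omega)]

-- ceil((b-1) / b) is 0 for positive b
lemma pv_ceil_zero (b : Int) (hb : 0 < b) : (PySem.Int.floordiv (b - 1) b).toNat = 0 := by
  have h : PySem.Int.floordiv (b - 1) b = 0 := by
    rw [PySem.Int.floordiv_eq_iff_of_pos hb]
    simp only [zero_mul, zero_add, one_mul]
    omega
  simp [h]

-- per-row equality: A's map over block starts = B's scatter
lemma pv_rowEq (b : Int) (hb : 0 < b) (row : List Int) :
    (PySem.List.pyRange 0 (row.length : Int) b).map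
      (fun i => (PySem.List.slice row (some i) (some (i + b))).foldl
        (fun xor_val v => PySem.Int.bxor xor_val |v|) 0)
      = (PySem.List.enumerate row 0).foldl (pvStep b)
          (List.replicate (PySem.Int.floordiv ((row.length : Int) + b - 1) b).toNat 0) := by
  by_cases h0 : row = []
  · subst h0
    rw [PySem.List.pyRange_of_pos _ _ hb]
    simp only [List.length_nil, Nat.cast_zero, lt_self_iff_false, if_false, List.range_zero,
      List.map_nil, PySem.List.enumerate_nil, List.foldl_nil, zero_add]
    rw [pv_ceil_zero b hb]
    simp
  · have hn1 : 1 ≤ row.length := List.length_pos_iff.mpr h0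
    have hn1' : (1 : Int) ≤ (row.length : Int) := by exact_mod_cast hn1
    rw [PySem.List.pyRange_of_pos _ _ hb, if_pos (by omega)]
    rw [PySem.Int.floordiv_eq_ediv_of_pos hb] at *
    by_cases hsmall : (row.length : Int) ≤ b
    · -- the whole row is a single block
      have hK : ((row.length : Int) - 0 + b - 1) / b = 1 := by
        rw [← PySem.Int.floordiv_eq_ediv_of_pos hb, PySem.Int.floordiv_eq_iff_of_pos hb]
        constructor <;> linarith
      have hK2 : ((row.length : Int) + b - 1) / b = 1 := by
        rw [show (row.length : Int) + b - 1 = (row.length : Int) - 0 + b - 1 by ring, hK]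
      rw [hK, hK2]
      simp only [Int.toNat_one, List.range_one, List.map_cons, List.map_nil,
        List.replicate_one]
      rw [pv_chunk0 b hb row 0 0 [] le_rfl (by omega)]
      have hslice : PySem.List.slice row (some (0 + b * ((0 : Nat) : Int)))
          (some (0 + b * ((0 : Nat) : Int) + b)) = row := by
        simp only [Nat.cast_zero, mul_zero, add_zero, zero_add]
        rw [PySem.List.slice_zero_start, PySem.List.slice_to _ (le_of_lt hb)]
        exact List.take_of_length_le (by omega)
      rw [hslice]
    · -- at least two blocks: peel the first chunk off both sides and recurse on the rest
      push_neg at hsmall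
      have hbne : b ≠ 0 := by omega
      have ih := pv_rowEq b hb (row.drop b.toNat)
      have hdl : ((row.drop b.toNat).length : Int) = (row.length : Int) - b := by
        rw [List.length_drop]; push_cast; omega
      have hKrec : 0 ≤ ((row.length : Int) - b + b - 1) / b :=
        Int.ediv_nonneg (by omega) (le_of_lt hb)
      have hK : ((row.length : Int) - 0 + b - 1) / b
          = ((row.length : Int) - b + b - 1) / b + 1 := by
        rw [show (row.length : Int) - 0 + b - 1 = ((row.length : Int) - b + b - 1) + 1 * b by ring,
            Int.add_mul_ediv_right _ 1 hbne]
      have h5 : (((row.drop b.toNat).length : Int) + b - 1) / b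
          = ((row.length : Int) - b + b - 1) / b := by rw [hdl]
      have hK2' : ((row.length : Int) + b - 1) / b
          = ((row.length : Int) - 0 + b - 1) / b := by
        rw [show (row.length : Int) + b - 1 = (row.length : Int) - 0 + b - 1 by ring]
      have hKt : (((row.length : Int) - 0 + b - 1) / b).toNat
          = (((row.length : Int) - b + b - 1) / b).toNat + 1 := by omega
      have hKt2 : (((row.length : Int) + b - 1) / b).toNat
          = ((((row.drop b.toNat).length : Int) + b - 1) / b).toNat + 1 := by omega
      rw [hKt, List.range_succ_eq_map, List.map_cons, List.map_map]
      have hrow : row.take b.toNat ++ row.drop b.toNat = row := List.take_append_drop _ _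
      have hclen : (row.take b.toNat).length = b.toNat := by rw [List.length_take]; omega
      have hsplit : PySem.List.enumerate row 0
          = PySem.List.enumerate (row.take b.toNat) 0
            ++ PySem.List.enumerate (row.drop b.toNat) (0 + ((row.take b.toNat).length : Int)) := by
        rw [← pv_enumerate_append, hrow]
      rw [hsplit, List.foldl_append, hKt2, List.replicate_succ]
      rw [pv_chunk0 b hb _ 0 0 _ le_rfl (by rw [hclen]; push_cast; omega)]
      rw [hclen, show ((0 : Int) + ((b.toNat : Nat) : Int)) = b + 0 by
        rw [Int.toNat_of_nonneg (le_of_lt hb)]; ring]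
      rw [pv_shift b hb _ 0 _ _ le_rfl]
      rw [PySem.List.pyRange_of_pos _ _ hb, if_pos (by rw [hdl]; omega)] at ih
      rw [PySem.Int.floordiv_eq_ediv_of_pos hb] at ih
      rw [show ((((row.drop b.toNat).length : Int)) - 0 + b - 1) = ((row.length : Int) - b + b - 1)
            by rw [hdl]; ring] at ih
      rw [← ih, List.map_map]
      simp only [List.map_cons, List.map_map, Nat.cast_zero, mul_zero, add_zero, zero_add]
      congr 1
      · -- heads agree: the first block is row.take b.toNat
        rw [PySem.List.slice_zero_start, PySem.List.slice_to _ (le_of_lt hb)]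
      · -- tails agree: block k+1 of row is block k of row.drop b.toNat
        apply List.map_congr_left
        intro k _
        simp only [Function.comp, Nat.succ_eq_add_one, Nat.cast_add, Nat.cast_one,
          mul_add, mul_one]
        have ht : PySem.List.slice row (some (b * (k : Int) + b)) (some (b * (k : Int) + b + b))
            = PySem.List.slice (row.drop b.toNat) (some (b * (k : Int)))
              (some (b * (k : Int) + b)) := by
          obtain ⟨t, rfl⟩ : ∃ t : Nat, b = (t : Int) :=
            ⟨b.toNat, (Int.toNat_of_nonneg (le_of_lt hb)).symm⟩
          have h1 : (t : Int) * (k : Int) + (t : Int) = ((t * k + t : Nat) : Int) := by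
            push_cast; ring
          have h2 : (t : Int) * (k : Int) + (t : Int) + (t : Int)
              = ((t * k + t + t : Nat) : Int) := by push_cast; ring
          have h3 : (t : Int) * (k : Int) = ((t * k : Nat) : Int) := by push_cast; ring
          rw [h2, h1, h3, PySem.List.slice_natCast, PySem.List.slice_natCast,
            Int.toNat_natCast, List.drop_drop, Nat.add_comm t (t * k)]
          congr 1
          omega
        rw [ht]
termination_by row.length
decreasing_by
  rw [List.length_drop]
  omega

-- ===== VERDICT (by name: the statement is the Claim_ definition above) =====
theorem block_xor_spec : Claim_equal_block_xor := by
  intro matrix b _ hpre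
  have hb : 0 < b := by
    have h1 : (1 : Int) ≤ b := hpre
    omega
  unfold Spec_block_xor block_xor block_xor_alt
  rw [PySem.List.foldl_append_singleton_eq_map, PySem.List.foldl_append_singleton_eq_map]
  simp only [List.nil_append]
  apply List.map_congr_left
  intro row _
  rw [PySem.List.foldl_append_singleton_eq_map]
  simp only [List.nil_append]
  exact pv_rowEq b hb row
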